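-- pv_equiv track=rewrite | github.com/eliottcassidy2000/math | 04-computation/W_ihalf_analysis.py | W_polynomial_coeffs
-- ===== SOURCE A (Python) =====
-- def W_polynomial_coeffs(Nf):
--     """
--     Compute the polynomial W(r) = sum_f N_f * (r+1/2)^f * (r-1/2)^{n-1-f}
--     as a list of coefficients [a_0, a_1, ..., a_{n-1}] where W(r) = sum a_k r^k.
--     Uses exact integer arithmetic (multiply by 2^{n-1} to clear denominators).
--     """
--     n = len(Nf)
--     deg = n - 1
--
--     # We'll work with 2^deg * W(r) to stay in integers.
--     # 2^deg * (r+1/2)^f * (r-1/2)^g = (2r+1)^f * (2r-1)^g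
--     # Let u = 2r. Then = (u+1)^f * (u-1)^g.
--     # This is a polynomial in u of degree f+g = deg.
--     # W_scaled(u) = sum_f N_f * (u+1)^f * (u-1)^{deg-f}
--
--     # Expand (u+1)^f = sum_j C(f,j) u^j
--     # Expand (u-1)^g = sum_k C(g,k) (-1)^{g-k} u^k
--     # Product: coeff of u^m = sum_{j+k=m} C(f,j) * C(g,k) * (-1)^{g-k}
--
--     from math import comb
--
--     # Polynomial in u (= 2r)
--     poly_u = [0] * (deg + 1)
--     for f in range(n):
--         g = deg - f
--         if Nf[f] == 0:
--             continue
--         for m in range(deg + 1):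
--             coeff_m = 0
--             for j in range(max(0, m - g), min(f, m) + 1):
--                 k = m - j
--                 coeff_m += comb(f, j) * comb(g, k) * ((-1) ** (g - k))
--             poly_u[m] += Nf[f] * coeff_m
--
--     return poly_u  # poly_u[m] = coefficient of u^m in 2^deg * W(r) where u=2r
-- ===== SOURCE B (Python) =====
-- def _mul_um1(p):
--     # p * (u - 1), coefficients ascending; [] stays []
--     if not p:
--         return []
--     return [(p[i-1] if i > 0 else 0) - (p[i] if i < len(p) else 0) for i in range(len(p) + 1)]
--
--
-- def _mul_up1(p):
--     # p * (u + 1)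
--     if not p:
--         return []
--     return [(p[i-1] if i > 0 else 0) + (p[i] if i < len(p) else 0) for i in range(len(p) + 1)]
--
--
-- def _add(p, q):
--     # elementwise sum, padded to the longer length
--     if len(p) < len(q):
--         p, q = q, p
--     return [p[i] + (q[i] if i < len(q) else 0) for i in range(len(p))]
--
--
-- def W_polynomial_coeffs(Nf):
--     # Horner in (u-1): acc_{t+1} = acc_t*(u-1) + N_t*(u+1)^t, apow maintained incrementally.
--     acc = []
--     apow = [1]
--     for c in Nf:
--         acc = _add(_mul_um1(acc), [c * a for a in apow])
--         apow = _mul_up1(apow)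
--     return acc
-- ===== Notes on version B (the rewrite author's own statement) =====
-- stated objective: faster
-- what changed: Replaces the triple loop over binomial-coefficient sums by a Horner-style accumulation acc = acc*(u-1) + N_f*(u+1)^f with the power (u+1)^f maintained incrementally by O(n) list convolutions, eliminating all comb() calls.
import Mathlib
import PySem

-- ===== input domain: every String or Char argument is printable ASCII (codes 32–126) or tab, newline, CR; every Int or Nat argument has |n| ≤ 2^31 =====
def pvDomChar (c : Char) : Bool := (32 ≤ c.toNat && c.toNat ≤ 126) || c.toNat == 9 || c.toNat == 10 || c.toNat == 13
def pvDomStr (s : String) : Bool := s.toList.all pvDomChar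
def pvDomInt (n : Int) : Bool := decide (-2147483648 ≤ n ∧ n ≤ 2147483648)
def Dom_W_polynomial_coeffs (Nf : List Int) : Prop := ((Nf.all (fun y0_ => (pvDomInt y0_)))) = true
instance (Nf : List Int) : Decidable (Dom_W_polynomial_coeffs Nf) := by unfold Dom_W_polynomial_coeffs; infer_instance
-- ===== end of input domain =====

-- B replaces A's triple loop of binomial-coefficient sums by a Horner-style accumulation
-- acc := acc*(u-1) + N_f*(u+1)^f with (u+1)^f maintained incrementally (objective: faster).

-- ===== PORT A =====
def pvComb (a b : Int) : Int := ((a.toNat).choose b.toNat : Int)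

def W_polynomial_coeffs (Nf : List Int) : List Int :=
  let n : Int := (Nf.length : Int)
  let deg : Int := n - 1
  let poly0 : List Int := List.replicate (deg + 1).toNat 0
  (PySem.List.pyRange 0 n 1).foldl (fun poly f =>
    let g := deg - f
    if PySem.List.pyGetD Nf f 0 = 0 then poly
    else
      (PySem.List.pyRange 0 (deg + 1) 1).foldl (fun poly m =>
        let coeff_m : Int :=
          (PySem.List.pyRange (max 0 (m - g)) (min f m + 1) 1).foldl
            (fun acc j =>
              let k := m - j
              acc + pvComb f j * pvComb g k * (-1 : Int) ^ ((g - k).toNat)) 0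
        poly.set m.toNat (PySem.List.pyGetD poly m 0 + PySem.List.pyGetD Nf f 0 * coeff_m))
        poly)
    poly0

-- ===== PORT B =====
def pvMulUm1 (p : List Int) : List Int :=
  if p.isEmpty then []
  else (List.range (p.length + 1)).map fun i =>
    (if 0 < i then p.getD (i - 1) 0 else 0) - (if i < p.length then p.getD i 0 else 0)

def pvMulUp1 (p : List Int) : List Int :=
  if p.isEmpty then []
  else (List.range (p.length + 1)).map fun i =>
    (if 0 < i then p.getD (i - 1) 0 else 0) + (if i < p.length then p.getD i 0 else 0)

def pvAddCore (p q : List Int) : List Int :=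
  (List.range p.length).map fun i => p.getD i 0 + (if i < q.length then q.getD i 0 else 0)

def pvAdd (p q : List Int) : List Int :=
  if p.length < q.length then pvAddCore q p else pvAddCore p q

def W_polynomial_coeffs_alt (Nf : List Int) : List Int :=
  (Nf.foldl (fun (st : List Int × List Int) c =>
      (pvAdd (pvMulUm1 st.1) (st.2.map (fun a => c * a)), pvMulUp1 st.2))
    ([], [1])).1

-- ===== PRECONDITION & SPEC =====
def Spec_W_polynomial_coeffs (Nf : List Int) (out : List Int) : Prop := out = W_polynomial_coeffs_alt Nf
instance (Nf : List Int) (out : List Int) : Decidable (Spec_W_polynomial_coeffs Nf out) := by unfold Spec_W_polynomial_coeffs; infer_instance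

-- ===== CLAIM (what is proved, stated in full; the proofs are below) =====
def Claim_equal_W_polynomial_coeffs : Prop := ∀ (Nf : List Int), Dom_W_polynomial_coeffs Nf → Spec_W_polynomial_coeffs Nf (W_polynomial_coeffs Nf)

-- ===== LEMMAS AND PROOFS =====
-- Both ports are shown to list the first n coefficients of the same polynomial
-- pvSS Nf n = Σ_f C (Nf[f]) * (X+1)^f * (X-1)^(n-1-f) in ℤ[X].

noncomputable def pvXp : Polynomial ℤ := Polynomial.X + 1

noncomputable def pvXm : Polynomial ℤ := Polynomial.X - 1

noncomputable def pvCList (P : Polynomial ℤ) (t : ℕ) : List Int := List.ofFn (n := t) fun i => P.coeff i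

noncomputable def pvSS (l : List Int) (t : ℕ) : Polynomial ℤ :=
  ∑ f ∈ Finset.range t, Polynomial.C (l.getD f 0) * pvXp ^ f * pvXm ^ (l.length - 1 - f)

theorem pvCList_length (P : Polynomial ℤ) (t : ℕ) : (pvCList P t).length = t := by
  simp [pvCList]

theorem pvCList_getD (P : Polynomial ℤ) (t i : ℕ) :
    (pvCList P t).getD i 0 = if i < t then P.coeff i else 0 := by
  simp [pvCList, List.getD_eq_getElem?_getD, List.getElem?_ofFn]
  split_ifs <;> simp_all

theorem pv_mulUm1_cList (P : Polynomial ℤ) (t : ℕ) (ht : 1 ≤ t) (h : ∀ m, t ≤ m → P.coeff m = 0) :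
    pvMulUm1 (pvCList P t) = pvCList (pvXm * P) (t + 1) := by
  have hne : (pvCList P t).isEmpty = false := by
    simp [← List.length_pos_iff, pvCList_length]; omega
  apply List.ext_getElem
  · simp [pvMulUm1, hne, pvCList_length]
  · intro i h1 h2
    simp only [pvMulUm1, hne, if_false, Bool.false_eq_true, pvCList_length] at h1 ⊢
    simp only [List.length_map, List.length_range] at h1
    rw [List.getElem_map, List.getElem_range]
    have hrhs : (pvCList (pvXm * P) (t+1))[i] = (pvXm * P).coeff i := by
      simp only [pvCList, List.getElem_ofFn]
    rw [hrhs, pvCList_getD, pvCList_getD]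
    have hXm : pvXm * P = Polynomial.X * P - P := by rw [pvXm]; ring
    rcases i with _ | j
    · have h0 : 0 < t := ht
      simp [hXm, Polynomial.mul_coeff_zero, h0]
    · have hxc : (Polynomial.X * P).coeff (j+1) = P.coeff j := Polynomial.coeff_X_mul P j
      simp only [hXm, Polynomial.coeff_sub, hxc]
      rw [if_pos (Nat.succ_pos j)]
      rw [show j + 1 - 1 = j from rfl, if_pos (show j < t by omega)]
      by_cases hc : j + 1 < t
      · simp [hc]
      · rw [if_neg hc, h (j+1) (by omega)]

theorem pv_mulUp1_cList (P : Polynomial ℤ) (t : ℕ) (ht : 1 ≤ t) (h : ∀ m, t ≤ m → P.coeff m = 0) :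
    pvMulUp1 (pvCList P t) = pvCList (pvXp * P) (t + 1) := by
  have hne : (pvCList P t).isEmpty = false := by
    simp [← List.length_pos_iff, pvCList_length]; omega
  apply List.ext_getElem
  · simp [pvMulUp1, hne, pvCList_length]
  · intro i h1 h2
    simp only [pvMulUp1, hne, if_false, Bool.false_eq_true, pvCList_length] at h1 ⊢
    simp only [List.length_map, List.length_range] at h1
    rw [List.getElem_map, List.getElem_range]
    have hrhs : (pvCList (pvXp * P) (t+1))[i] = (pvXp * P).coeff i := by
      simp only [pvCList, List.getElem_ofFn]
    rw [hrhs, pvCList_getD, pvCList_getD]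
    have hXp : pvXp * P = Polynomial.X * P + P := by rw [pvXp]; ring
    rcases i with _ | j
    · have h0 : 0 < t := ht
      simp [hXp, Polynomial.mul_coeff_zero, h0]
    · have hxc : (Polynomial.X * P).coeff (j+1) = P.coeff j := Polynomial.coeff_X_mul P j
      simp only [hXp, Polynomial.coeff_add, hxc]
      rw [if_pos (Nat.succ_pos j)]
      rw [show j + 1 - 1 = j from rfl, if_pos (show j < t by omega)]
      by_cases hc : j + 1 < t
      · simp [hc]
      · rw [if_neg hc, h (j+1) (by omega)]

theorem pv_map_cList (P : Polynomial ℤ) (t : ℕ) (c : ℤ) :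
    (pvCList P t).map (fun a => c * a) = pvCList (Polynomial.C c * P) t := by
  simp [pvCList, List.map_ofFn]
  rfl

theorem pv_add_cList (P Q : Polynomial ℤ) (t : ℕ) :
    pvAdd (pvCList P t) (pvCList Q t) = pvCList (P + Q) t := by
  apply List.ext_getElem
  · simp [pvAdd, pvAddCore, pvCList_length]
  · intro i h1 h2
    simp only [pvAdd, pvCList_length, lt_irrefl, if_false, pvAddCore] at h1 ⊢
    simp only [List.length_map, List.length_range] at h1
    rw [List.getElem_map, List.getElem_range]
    have hrhs : (pvCList (P + Q) t)[i] = (P + Q).coeff i := by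
      simp only [pvCList, List.getElem_ofFn]
    rw [hrhs, pvCList_getD, pvCList_getD]
    rw [pvCList_length] at h2
    simp [h2]

theorem pvXp_natDegree : pvXp.natDegree = 1 := by
  have : pvXp = Polynomial.X + Polynomial.C 1 := by simp [pvXp]
  rw [this, Polynomial.natDegree_X_add_C]

theorem pvXm_natDegree : pvXm.natDegree = 1 := by
  have : pvXm = Polynomial.X + Polynomial.C (-1) := by simp [pvXm]; ring
  rw [this, Polynomial.natDegree_X_add_C]

theorem pvXp_pow_vanish (t m : ℕ) (h : t < m) : ((pvXp : Polynomial ℤ) ^ t).coeff m = 0 := by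
  apply Polynomial.coeff_eq_zero_of_natDegree_lt
  calc (pvXp ^ t).natDegree ≤ t * pvXp.natDegree := Polynomial.natDegree_pow_le
    _ = t := by rw [pvXp_natDegree]; ring
    _ < m := h

theorem pvSS_vanish (l : List Int) (t m : ℕ) (htl : t ≤ l.length) (hm : l.length ≤ m) :
    (pvSS l t).coeff m = 0 := by
  unfold pvSS
  rw [Polynomial.finset_sum_coeff]
  apply Finset.sum_eq_zero
  intro f hf
  rw [Finset.mem_range] at hf
  apply Polynomial.coeff_eq_zero_of_natDegree_lt
  calc (Polynomial.C (l.getD f 0) * pvXp ^ f * pvXm ^ (l.length - 1 - f)).natDegree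
      ≤ (Polynomial.C (l.getD f 0) * pvXp ^ f).natDegree + (pvXm ^ (l.length - 1 - f)).natDegree :=
        Polynomial.natDegree_mul_le
    _ ≤ f * pvXp.natDegree + (l.length - 1 - f) * pvXm.natDegree := by
        have := Polynomial.natDegree_C_mul_le (l.getD f 0) (pvXp ^ f)
        have h1 := Polynomial.natDegree_pow_le (p := pvXp) (n := f)
        have h2 := Polynomial.natDegree_pow_le (p := pvXm) (n := l.length - 1 - f)
        omega
    _ < m := by rw [pvXp_natDegree, pvXm_natDegree]; omega

theorem pv_step (P : Polynomial ℤ) (n : ℕ) (h : ∀ m, n ≤ m → P.coeff m = 0) (c : ℤ) :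
    (pvAdd (pvMulUm1 (pvCList P n)) ((pvCList (pvXp ^ n) (n+1)).map (fun a => c * a)),
     pvMulUp1 (pvCList (pvXp ^ n) (n+1)))
    = (pvCList (pvXm * P + Polynomial.C c * pvXp ^ n) (n+1), pvCList (pvXp ^ (n+1)) (n+2)) := by
  have hXpvan : ∀ m, n + 1 ≤ m → ((pvXp : Polynomial ℤ) ^ n).coeff m = 0 := fun m hm =>
    pvXp_pow_vanish n m (by omega)
  have h2 : pvMulUp1 (pvCList (pvXp ^ n) (n+1)) = pvCList (pvXp * pvXp ^ n) (n+2) :=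
    pv_mulUp1_cList _ _ (by omega) hXpvan
  rw [h2, ← pow_succ']
  rcases Nat.eq_zero_or_pos n with hn | hn
  · subst hn
    have hP0 : P = 0 := Polynomial.ext fun m => by simpa using h m (by omega)
    subst hP0
    simp only [pow_zero, mul_zero, zero_add, mul_one]
    congr 1
    have e1 : pvCList (0 : Polynomial ℤ) 0 = [] := rfl
    have e2 : pvCList (1 : Polynomial ℤ) 1 = [1] := by
      simp [pvCList, List.ofFn_succ]
    rw [e1, e2]
    have e3 : pvMulUm1 [] = [] := rfl
    rw [e3]
    have e4 : ([1] : List Int).map (fun a => c * a) = [c] := by simp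
    rw [e4]
    have e5 : pvAdd [] [c] = [c] := by simp [pvAdd, pvAddCore]
    rw [e5]
    apply List.ext_getElem
    · simp [pvCList_length]
    · intro i h1 hh2
      simp only [List.length_cons, List.length_nil] at h1
      interval_cases i
      simp [pvCList, List.ofFn_succ]
  · rw [pv_mulUm1_cList P n hn h, pv_map_cList, pv_add_cList]

theorem pvSS_snoc (l : List Int) (c : ℤ) :
    pvSS (l ++ [c]) (l.length + 1)
      = pvXm * pvSS l l.length + Polynomial.C c * pvXp ^ l.length := by
  unfold pvSS
  rw [Finset.sum_range_succ, Finset.mul_sum]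
  congr 1
  · apply Finset.sum_congr rfl
    intro f hf
    rw [Finset.mem_range] at hf
    have hg : (l ++ [c]).getD f 0 = l.getD f 0 := by
      simp [List.getD_eq_getElem?_getD, List.getElem?_append_left hf]
    have he : (l ++ [c]).length - 1 - f = (l.length - 1 - f) + 1 := by
      simp [List.length_append]; omega
    rw [hg, he, pow_succ]
    ring
  · have hg : (l ++ [c]).getD l.length 0 = c := by
      simp [List.getD_eq_getElem?_getD]
    have he : (l ++ [c]).length - 1 - l.length = 0 := by simp
    rw [hg, he, pow_zero, mul_one]

theorem pv_b_inv (l : List Int) :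
    l.foldl (fun (st : List Int × List Int) c =>
      (pvAdd (pvMulUm1 st.1) (st.2.map (fun a => c * a)), pvMulUp1 st.2)) ([], [1])
    = (pvCList (pvSS l l.length) l.length, pvCList (pvXp ^ l.length) (l.length + 1)) := by
  induction l using List.reverseRecOn with
  | nil =>
      simp only [List.foldl_nil, List.length_nil, pow_zero, zero_add]
      have e1 : pvCList (pvSS [] 0) 0 = [] := by simp [pvCList]
      have e2 : pvCList (1 : Polynomial ℤ) 1 = [1] := by simp [pvCList, List.ofFn_succ]
      rw [e1, e2]
  | append_singleton l c ih =>
      rw [List.foldl_append, ih]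
      simp only [List.foldl_cons, List.foldl_nil]
      rw [pv_step (pvSS l l.length) l.length
            (fun m hm => pvSS_vanish l l.length m (le_refl _) hm) c]
      rw [List.length_append, List.length_singleton, pvSS_snoc]

theorem pv_b_char (Nf : List Int) :
    W_polynomial_coeffs_alt Nf = pvCList (pvSS Nf Nf.length) Nf.length := by
  unfold W_polynomial_coeffs_alt
  rw [pv_b_inv]

noncomputable def pvFN (t gn mi : ℕ) (j : ℕ) : ℤ :=
  (t.choose j : ℤ) * (gn.choose (mi - j) : ℤ) * (-1 : ℤ) ^ (gn - (mi - j))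

theorem pv_bridge (t gn mi : ℕ) :
    (PySem.List.pyRange (max 0 ((mi:ℤ) - (gn:ℤ))) (min (t:ℤ) (mi:ℤ) + 1) 1).foldl
      (fun acc j => acc + pvComb (t:ℤ) j * pvComb (gn:ℤ) ((mi:ℤ) - j) * (-1:ℤ) ^ (((gn:ℤ) - ((mi:ℤ) - j)).toNat)) 0
    = (pvXp ^ t * pvXm ^ gn).coeff mi := by
  have hlo : max 0 ((mi:ℤ) - (gn:ℤ)) = ((mi - gn : ℕ) : ℤ) := by omega
  have hhi : min (t:ℤ) (mi:ℤ) + 1 = ((min t mi : ℕ) : ℤ) + 1 := by push_cast; omega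
  rw [hlo, hhi, PySem.List.pyRange_one, PySem.List.foldl_add, zero_add, List.map_map]
  have hL : (((min t mi : ℕ) : ℤ) + 1 - ((mi - gn : ℕ) : ℤ)).toNat = min t mi + 1 - (mi - gn) := by
    omega
  rw [hL]
  have hsum : ∀ (L : ℕ) (f : ℕ → ℤ), ((List.range L).map f).sum = ∑ k ∈ Finset.range L, f k :=
    fun L f => rfl
  rw [hsum]
  have hterm : ∀ k ∈ Finset.range (min t mi + 1 - (mi - gn)),
      ((fun j => pvComb (t:ℤ) j * pvComb (gn:ℤ) ((mi:ℤ) - j) * (-1:ℤ) ^ (((gn:ℤ) - ((mi:ℤ) - j)).toNat))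
          ∘ fun k : ℕ => ((mi - gn : ℕ) : ℤ) + (k : ℤ)) k
        = pvFN t gn mi ((mi - gn) + k) := by
    intro k hk
    rw [Finset.mem_range] at hk
    simp only [Function.comp]
    have e1 : ((((mi - gn : ℕ) : ℤ) + (k : ℤ))).toNat = (mi - gn) + k := by omega
    have e2 : ((mi : ℤ) - (((mi - gn : ℕ) : ℤ) + (k : ℤ))).toNat = mi - ((mi - gn) + k) := by omega
    have e3 : (((gn : ℤ)) - ((mi : ℤ) - (((mi - gn : ℕ) : ℤ) + (k : ℤ)))).toNat
        = gn - (mi - ((mi - gn) + k)) := by omega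
    simp only [pvComb, pvFN, e1, e2, e3, Int.toNat_natCast]
  rw [Finset.sum_congr rfl hterm, ← Finset.sum_Ico_eq_sum_range]
  have hsub : Finset.Ico (mi - gn) (min t mi + 1) ⊆ Finset.range (mi+1) := by
    intro j hj; rw [Finset.mem_Ico] at hj; rw [Finset.mem_range]; omega
  have hz : ∀ j ∈ Finset.range (mi+1), j ∉ Finset.Ico (mi - gn) (min t mi + 1) → pvFN t gn mi j = 0 := by
    intro j hj hnot
    rw [Finset.mem_range] at hj
    rw [Finset.mem_Ico, not_and_or, not_le, not_lt] at hnot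
    rcases hnot with hlt | hge
    · have hc : gn < mi - j := by omega
      rw [pvFN, Nat.choose_eq_zero_of_lt hc]; simp
    · have hc : t < j := by omega
      rw [pvFN, Nat.choose_eq_zero_of_lt hc]; simp
  rw [Finset.sum_subset hsub hz]
  rw [Polynomial.coeff_mul, Finset.Nat.sum_antidiagonal_eq_sum_range_succ_mk]
  apply Finset.sum_congr rfl
  intro j hj
  have hp : (pvXp ^ t).coeff j = (t.choose j : ℤ) := by
    rw [pvXp]
    exact Polynomial.coeff_X_add_one_pow ℤ t j
  have hm2 : ((pvXm : Polynomial ℤ) ^ gn).coeff (mi - j) = (-1:ℤ)^(gn - (mi - j)) * (gn.choose (mi - j) : ℤ) := by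
    have hx : pvXm = Polynomial.X + Polynomial.C (-1) := by rw [pvXm]; simp [sub_eq_add_neg]
    rw [hx, Polynomial.coeff_X_add_C_pow]
  rw [hp, hm2, pvFN]
  ring

theorem pv_setloop (w : ℕ → ℤ) (k : ℕ) : ∀ (poly : List Int), k ≤ poly.length →
    ((List.range k).foldl (fun p m => p.set m (p.getD m 0 + w m)) poly).length = poly.length ∧
    ∀ i, ((List.range k).foldl (fun p m => p.set m (p.getD m 0 + w m)) poly).getD i 0
        = poly.getD i 0 + (if i < k then w i else 0) := by
  induction k with
  | zero => intro poly _; simp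
  | succ k ih =>
      intro poly hk
      rw [List.range_succ, List.foldl_append, List.foldl_cons, List.foldl_nil]
      obtain ⟨ihlen, ihget⟩ := ih poly (by omega)
      constructor
      · rw [List.length_set, ihlen]
      · intro i
        by_cases hik : i = k
        · subst hik
          have hilt : i < ((List.range i).foldl (fun p m => p.set m (p.getD m 0 + w m)) poly).length := by
            omega
          rw [List.getD_eq_getElem?_getD, List.getElem?_set_self hilt]
          simp only [Option.getD_some, ihget i]
          simp
        · rw [List.getD_eq_getElem?_getD, List.getElem?_set_ne (by omega)]
          rw [← List.getD_eq_getElem?_getD, ihget i]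
          by_cases h1 : i < k
          · rw [if_pos h1, if_pos (by omega)]
          · rw [if_neg h1, if_neg (by omega)]

theorem pvTerm_vanish (a : ℤ) (f g m : ℕ) (h : f + g < m) :
    (Polynomial.C a * pvXp ^ f * pvXm ^ g).coeff m = 0 := by
  apply Polynomial.coeff_eq_zero_of_natDegree_lt
  calc (Polynomial.C a * pvXp ^ f * pvXm ^ g).natDegree
      ≤ (Polynomial.C a * pvXp ^ f).natDegree + (pvXm ^ g).natDegree := Polynomial.natDegree_mul_le
    _ ≤ f * pvXp.natDegree + g * pvXm.natDegree := by
        have := Polynomial.natDegree_C_mul_le a (pvXp ^ f)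
        have h1 := Polynomial.natDegree_pow_le (p := pvXp) (n := f)
        have h2 := Polynomial.natDegree_pow_le (p := pvXm) (n := g)
        omega
    _ < m := by rw [pvXp_natDegree, pvXm_natDegree]; omega

def pvBodyA (Nf : List Int) (poly : List Int) (f : ℤ) : List Int :=
  let g := ((Nf.length : ℤ) - 1) - f
  if PySem.List.pyGetD Nf f 0 = 0 then poly
  else
    (PySem.List.pyRange 0 ((Nf.length : ℤ) - 1 + 1) 1).foldl (fun poly m =>
      let coeff_m : Int :=
        (PySem.List.pyRange (max 0 (m - g)) (min f m + 1) 1).foldl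
          (fun acc j =>
            let k := m - j
            acc + pvComb f j * pvComb g k * (-1 : Int) ^ ((g - k).toNat)) 0
      poly.set m.toNat (PySem.List.pyGetD poly m 0 + PySem.List.pyGetD Nf f 0 * coeff_m))
      poly

theorem pvA_eq (Nf : List Int) :
    W_polynomial_coeffs Nf
      = ((List.range Nf.length).map (fun k : ℕ => (k : ℤ))).foldl (pvBodyA Nf)
          (List.replicate Nf.length 0) := by
  simp only [W_polynomial_coeffs]
  rw [show (((Nf.length : ℤ) - 1) + 1).toNat = Nf.length by omega]
  rw [PySem.List.pyRange_zero_natCast]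
  rfl

theorem pvBodyA_char (Nf : List Int) (t : ℕ) (ht : t < Nf.length) (poly : List Int)
    (hlen : poly.length = Nf.length) :
    (pvBodyA Nf poly (t : ℤ)).length = Nf.length ∧
    ∀ i, (pvBodyA Nf poly (t : ℤ)).getD i 0
        = poly.getD i 0 + (if i < Nf.length then
            Nf.getD t 0 * (pvXp ^ t * pvXm ^ (Nf.length - 1 - t)).coeff i else 0) := by
  have hg : ((Nf.length : ℤ) - 1) - (t : ℤ) = ((Nf.length - 1 - t : ℕ) : ℤ) := by omega
  unfold pvBodyA
  rw [PySem.List.pyGetD_natCast]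
  by_cases h0 : Nf.getD t 0 = 0
  · rw [if_pos h0]
    exact ⟨hlen, fun i => by rw [h0]; simp⟩
  · rw [if_neg h0]
    rw [show ((Nf.length : ℤ) - 1 + 1) = ((Nf.length : ℕ) : ℤ) by ring]
    rw [PySem.List.pyRange_zero_natCast, List.foldl_map]
    simp only [hg, Int.toNat_natCast, PySem.List.pyGetD_natCast, pv_bridge]
    have hs := pv_setloop
      (fun mi => Nf.getD t 0 * (pvXp ^ t * pvXm ^ (Nf.length - 1 - t)).coeff mi)
      Nf.length poly (by omega)
    constructor
    · exact hs.1.trans hlen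
    · intro i
      rw [hs.2 i]

theorem pv_a_outer (Nf : List Int) (t : ℕ) (ht : t ≤ Nf.length) :
    (((List.range t).map (fun k : ℕ => (k : ℤ))).foldl (pvBodyA Nf)
        (List.replicate Nf.length 0)).length = Nf.length ∧
    ∀ i, (((List.range t).map (fun k : ℕ => (k : ℤ))).foldl (pvBodyA Nf)
        (List.replicate Nf.length 0)).getD i 0 = (pvSS Nf t).coeff i := by
  induction t with
  | zero =>
      refine ⟨by simp, ?_⟩
      intro i
      simp [pvSS, List.getD_eq_getElem?_getD, List.getElem?_replicate]
      split_ifs <;> simp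
  | succ t ih =>
      obtain ⟨ihlen, ihget⟩ := ih (by omega)
      rw [List.range_succ, List.map_append, List.map_cons, List.map_nil, List.foldl_append,
        List.foldl_cons, List.foldl_nil]
      have hchar := pvBodyA_char Nf t (by omega) _ ihlen
      refine ⟨hchar.1, fun i => ?_⟩
      rw [hchar.2 i, ihget i]
      have hsucc : pvSS Nf (t+1)
          = pvSS Nf t + Polynomial.C (Nf.getD t 0) * pvXp ^ t * pvXm ^ (Nf.length - 1 - t) := by
        unfold pvSS; rw [Finset.sum_range_succ]
      rw [hsucc, Polynomial.coeff_add]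
      by_cases hi : i < Nf.length
      · rw [if_pos hi]
        congr 1
        rw [mul_assoc, Polynomial.coeff_C_mul]
      · rw [if_neg hi]
        rw [pvTerm_vanish _ _ _ _ (by omega), add_zero]

theorem pv_a_char (Nf : List Int) :
    W_polynomial_coeffs Nf = pvCList (pvSS Nf Nf.length) Nf.length := by
  rw [pvA_eq]
  obtain ⟨hlen, hget⟩ := pv_a_outer Nf Nf.length le_rfl
  apply List.ext_getElem
  · rw [hlen, pvCList_length]
  · intro i h1 h2
    have hgi := hget i
    rw [List.getD_eq_getElem?_getD, List.getElem?_eq_getElem h1, Option.getD_some] at hgi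
    rw [hgi]
    simp only [pvCList, List.getElem_ofFn]

-- ===== VERDICT (by name: the statement is the Claim_ definition above) =====
theorem W_polynomial_coeffs_spec : Claim_equal_W_polynomial_coeffs := by
  intro Nf _
  show _ = _
  rw [pv_a_char, pv_b_char]
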